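-- pv_equiv track=rewrite | github.com/RasmusAaen/AdventOfCode | 2015/day11.py | hasRepeat
-- ===== SOURCE A (Python) =====
-- def hasRepeat(val: str) -> bool:
--     cnt = i = 0
--     c = ''
--     while i < len(val)-1 and cnt < 2:
--         if val[i] == val[i+1] and val[i] != c:
--             cnt += 1
--             i += 1
--             c = [val[i]]
--         i += 1
--     return cnt == 2
-- ===== SOURCE B (Python) =====
-- def hasRepeat(val: str) -> bool:
--     pairs = [i for i in range(len(val) - 1) if val[i] == val[i + 1]]
--     return bool(pairs) and pairs[-1] >= pairs[0] + 2
-- ===== Notes on version B (the rewrite author's own statement) =====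
-- stated objective: idiomatic
-- what changed: A's stateful greedy while-loop with a counter and a dead distinctness guard (it compares a char to '' or to a list, so it never fires) is replaced by collecting all adjacent-equal pair positions in one comprehension and checking that the last pair starts at least two positions after the first.
import Mathlib
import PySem

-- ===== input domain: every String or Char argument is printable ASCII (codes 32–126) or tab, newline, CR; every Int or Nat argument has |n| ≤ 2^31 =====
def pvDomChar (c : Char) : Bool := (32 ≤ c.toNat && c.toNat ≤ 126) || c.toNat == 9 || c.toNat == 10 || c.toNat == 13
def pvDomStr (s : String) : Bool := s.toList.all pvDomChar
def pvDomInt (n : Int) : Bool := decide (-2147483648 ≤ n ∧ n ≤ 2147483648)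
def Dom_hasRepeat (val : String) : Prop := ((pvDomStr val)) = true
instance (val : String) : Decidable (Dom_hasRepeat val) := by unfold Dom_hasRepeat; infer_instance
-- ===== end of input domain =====

-- B replaces A's stateful greedy counter loop by collecting all adjacent-equal pair
-- positions once and comparing the first and last (objective: idiomatic/simpler).

-- ===== PORT A =====
-- Python's `c` is first the string '' and later a one-element list: model it as a sum.
-- `val[i] != c` compares a 1-char string with c (a string or a list).
def pyCharNe (a : Char) (c : Sum String (List Char)) : Bool :=
  match c with
  | .inl s => String.ofList [a] != s
  | .inr _ => true  -- in Python a str is never == to a list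

def loopA (l : List Char) (cnt i : Nat) (c : Sum String (List Char)) : Nat :=
  if _h : i < l.length - 1 ∧ cnt < 2 then
    if (l.getD i ' ' == l.getD (i + 1) ' ') && pyCharNe (l.getD i ' ') c then
      -- cnt += 1; i += 1; c = [val[i]]; i += 1
      loopA l (cnt + 1) (i + 2) (.inr [l.getD (i + 1) ' '])
    else
      loopA l cnt (i + 1) c
  else cnt
termination_by l.length - i
decreasing_by all_goals omega

def hasRepeat (val : String) : Bool :=
  decide (loopA val.toList 0 0 (.inl "") = 2)

-- ===== PORT B =====
def hasRepeat_alt (val : String) : Bool :=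
  let l := val.toList
  let pairs := (List.range (l.length - 1)).filter (fun i => l.getD i ' ' == l.getD (i + 1) ' ')
  !pairs.isEmpty && decide (pairs.headD 0 + 2 ≤ pairs.getLastD 0)

-- ===== PRECONDITION & SPEC =====
def Spec_hasRepeat (val : String) (out : Bool) : Prop := out = hasRepeat_alt val
instance (val : String) (out : Bool) : Decidable (Spec_hasRepeat val out) := by unfold Spec_hasRepeat; infer_instance

-- ===== CLAIM (what is proved, stated in full; the proofs are below) =====
def Claim_equal_hasRepeat : Prop := ∀ (val : String), Dom_hasRepeat val → Spec_hasRepeat val (hasRepeat val)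

-- ===== LEMMAS AND PROOFS =====

/-- There is an adjacent equal pair at position `j`. -/
def PairAt (l : List Char) (j : Nat) : Prop :=
  j + 1 < l.length ∧ l.getD j ' ' = l.getD (j + 1) ' '

theorem pyCharNe_inl_empty (a : Char) : pyCharNe a (.inl "") = true := by
  simp [pyCharNe]

theorem getLastD_cons_cons' {α : Type} (a b : α) (u : List α) (d : α) :
    (a :: b :: u).getLastD d = (b :: u).getLastD d := by
  simp [List.getLastD_eq_getLast?, List.getLast?_cons_cons]

theorem loopA_eq_two (l : List Char) (i cnt : Nat) (c : Sum String (List Char))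
    (hcnt : cnt ≤ 2) (hc : ∀ a, pyCharNe a c = true) :
    (loopA l cnt i c = 2 ↔
      cnt = 2 ∨ (cnt = 1 ∧ ∃ j, i ≤ j ∧ PairAt l j) ∨
        (cnt = 0 ∧ ∃ j k, i ≤ j ∧ j + 2 ≤ k ∧ PairAt l j ∧ PairAt l k)) := by
  rw [loopA]
  by_cases hg : i < l.length - 1 ∧ cnt < 2
  · rw [dif_pos hg]
    by_cases hp : l.getD i ' ' = l.getD (i + 1) ' '
    · have hcond : ((l.getD i ' ' == l.getD (i + 1) ' ') && pyCharNe (l.getD i ' ') c) = true := by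
        rw [hp]
        simp only [beq_self_eq_true, Bool.true_and]
        exact hc _
      rw [if_pos hcond]
      rw [loopA_eq_two l (i + 2) (cnt + 1) _ (by omega) (by intro a; rfl)]
      have hpi : PairAt l i := ⟨by omega, hp⟩
      constructor
      · rintro (h2 | ⟨h1, j, hj, hpj⟩ | ⟨h0, _⟩)
        · exact Or.inr (Or.inl ⟨by omega, i, le_refl _, hpi⟩)
        · exact Or.inr (Or.inr ⟨by omega, i, j, le_refl _, hj, hpi, hpj⟩)
        · omega
      · rintro (h2 | ⟨h1, j, hj, hpj⟩ | ⟨h0, j, k, hj, hjk, hpj, hpk⟩)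
        · omega
        · exact Or.inl (by omega)
        · exact Or.inr (Or.inl ⟨by omega, k, by omega, hpk⟩)
    · have hbeq : (l.getD i ' ' == l.getD (i + 1) ' ') = false := beq_eq_false_iff_ne.mpr hp
      rw [hbeq, Bool.false_and]
      simp only [Bool.false_eq_true, if_false]
      rw [loopA_eq_two l (i + 1) cnt c hcnt hc]
      have hnoti : ¬ PairAt l i := fun h => hp h.2
      constructor
      · rintro (h2 | ⟨h1, j, hj, hpj⟩ | ⟨h0, j, k, hj, hjk, hpj, hpk⟩)
        · exact Or.inl h2
        · exact Or.inr (Or.inl ⟨h1, j, by omega, hpj⟩)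
        · exact Or.inr (Or.inr ⟨h0, j, k, by omega, hjk, hpj, hpk⟩)
      · rintro (h2 | ⟨h1, j, hj, hpj⟩ | ⟨h0, j, k, hj, hjk, hpj, hpk⟩)
        · exact Or.inl h2
        · refine Or.inr (Or.inl ⟨h1, j, ?_, hpj⟩)
          rcases Nat.eq_or_lt_of_le hj with rfl | h
          · exact absurd hpj hnoti
          · omega
        · refine Or.inr (Or.inr ⟨h0, j, k, ?_, hjk, hpj, hpk⟩)
          rcases Nat.eq_or_lt_of_le hj with rfl | h
          · exact absurd hpj hnoti
          · omega
  · rw [dif_neg hg]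
    constructor
    · intro h; exact Or.inl h
    · rintro (h2 | ⟨h1, j, hj, hpj⟩ | ⟨h0, j, k, hj, hjk, hpj, hpk⟩)
      · exact h2
      · exact absurd hpj.1 (by omega)
      · exact absurd hpj.1 (by omega)
termination_by l.length - i
decreasing_by all_goals omega

theorem hasRepeat_iff (val : String) :
    hasRepeat val = true ↔ ∃ j k, j + 2 ≤ k ∧ PairAt val.toList j ∧ PairAt val.toList k := by
  unfold hasRepeat
  rw [decide_eq_true_iff,
    loopA_eq_two val.toList 0 0 (.inl "") (by omega) (fun a => pyCharNe_inl_empty a)]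
  constructor
  · rintro (h | ⟨h, _⟩ | ⟨_, j, k, _, hjk, hpj, hpk⟩)
    · omega
    · omega
    · exact ⟨j, k, hjk, hpj, hpk⟩
  · rintro ⟨j, k, hjk, hpj, hpk⟩
    exact Or.inr (Or.inr ⟨rfl, j, k, Nat.zero_le _, hjk, hpj, hpk⟩)

theorem mem_pairs_iff (l : List Char) (j : Nat) :
    j ∈ (List.range (l.length - 1)).filter
        (fun i => l.getD i ' ' == l.getD (i + 1) ' ') ↔ PairAt l j := by
  simp [List.mem_filter, List.mem_range, PairAt]
  omega

theorem pairs_sorted (l : List Char) :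
    ((List.range (l.length - 1)).filter
        (fun i => l.getD i ' ' == l.getD (i + 1) ' ')).Pairwise (· < ·) :=
  List.Pairwise.sublist (List.filter_sublist (l := List.range (l.length - 1)))
    List.pairwise_lt_range

theorem headD_le_of_mem {xs : List Nat} (h : xs.Pairwise (· < ·)) {x : Nat} (hx : x ∈ xs) :
    xs.headD 0 ≤ x := by
  cases xs with
  | nil => cases hx
  | cons a t =>
    rcases List.mem_cons.mp hx with rfl | hxt
    · simp
    · exact le_of_lt ((List.pairwise_cons.mp h).1 x hxt)

theorem le_getLastD_of_mem :
    ∀ (xs : List Nat), xs.Pairwise (· < ·) → ∀ x ∈ xs, x ≤ xs.getLastD 0 := by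
  intro xs
  induction xs with
  | nil => intro _ x hx; cases hx
  | cons a t ih =>
    intro h x hx
    rcases List.pairwise_cons.mp h with ⟨ha, ht⟩
    cases t with
    | nil =>
      rcases List.mem_cons.mp hx with rfl | h'
      · simp
      · cases h'
    | cons b u =>
      rw [getLastD_cons_cons']
      rcases List.mem_cons.mp hx with rfl | hxt
      · exact le_trans (ha b (by simp)).le (ih ht b (by simp))
      · exact ih ht x hxt

theorem headD_mem {xs : List Nat} (h : xs ≠ []) : xs.headD 0 ∈ xs := by
  cases xs with
  | nil => exact absurd rfl h
  | cons a t => simp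

theorem getLastD_mem {xs : List Nat} (h : xs ≠ []) : xs.getLastD 0 ∈ xs := by
  induction xs with
  | nil => exact absurd rfl h
  | cons a t ih =>
    cases t with
    | nil => simp
    | cons b u =>
      rw [getLastD_cons_cons']
      exact List.mem_cons_of_mem a (ih (by simp))

theorem hasRepeat_alt_iff (val : String) :
    hasRepeat_alt val = true ↔
      ∃ j k, j + 2 ≤ k ∧ PairAt val.toList j ∧ PairAt val.toList k := by
  unfold hasRepeat_alt
  set l := val.toList with hl
  set pairs := (List.range (l.length - 1)).filter
      (fun i => l.getD i ' ' == l.getD (i + 1) ' ') with hpairs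
  have hsorted : pairs.Pairwise (· < ·) := pairs_sorted l
  simp only [Bool.and_eq_true, Bool.not_eq_true', List.isEmpty_eq_false_iff,
    decide_eq_true_iff]
  rw [← hpairs]
  constructor
  · rintro ⟨hne, hle⟩
    refine ⟨pairs.headD 0, pairs.getLastD 0, hle, ?_, ?_⟩
    · exact (mem_pairs_iff l _).mp (headD_mem hne)
    · exact (mem_pairs_iff l _).mp (getLastD_mem hne)
  · rintro ⟨j, k, hjk, hpj, hpk⟩
    have hjm : j ∈ pairs := (mem_pairs_iff l j).mpr hpj
    have hkm : k ∈ pairs := (mem_pairs_iff l k).mpr hpk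
    have hne : pairs ≠ [] := by intro h; rw [h] at hjm; cases hjm
    refine ⟨hne, ?_⟩
    have h1 := headD_le_of_mem hsorted hjm
    have h2 := le_getLastD_of_mem pairs hsorted k hkm
    omega

-- ===== VERDICT (by name: the statement is the Claim_ definition above) =====
theorem hasRepeat_spec : Claim_equal_hasRepeat := by
  intro val _
  unfold Spec_hasRepeat
  have := (hasRepeat_iff val).trans (hasRepeat_alt_iff val).symm
  cases h1 : hasRepeat val <;> cases h2 : hasRepeat_alt val <;> simp_all
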